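-- pv_equiv track=rewrite | github.com/Mkt-Lks21/projeto-escola | services/chart-processor/app/inference.py | _choose_preferred_series_column
-- ===== SOURCE A (Python) =====
-- def _choose_preferred_series_column(
--     candidates: list[str], ordered_columns: list[str]
-- ) -> str | None:
--     if not candidates:
--         return None
--
--     order_index = {name: index for index, name in enumerate(ordered_columns)}
--
--     def score(column: str) -> tuple[int, int]:
--         name = column.lower()
--         keywords = [
--             "ano",
--             "year",
--             "exercicio",
--             "safra",
--             "periodo",
--             "serie",
--             "segmento",
--             "categoria",
--         ]
--         for rank, keyword in enumerate(keywords):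
--             if keyword in name:
--                 return rank, order_index.get(column, 10_000)
--         return 99, order_index.get(column, 10_000)
--
--     return min(candidates, key=score)
-- ===== SOURCE B (Python) =====
-- def _choose_preferred_series_column(
--     candidates: list[str], ordered_columns: list[str]
-- ) -> str | None:
--     if not candidates:
--         return None
--
--     order_index = {name: index for index, name in enumerate(ordered_columns)}
--
--     def oi(column: str) -> int:
--         return order_index.get(column, 10_000)
--
--     keywords = [
--         "ano",
--         "year",
--         "exercicio",
--         "safra",
--         "periodo",
--         "serie",
--         "segmento",
--         "categoria",
--     ]
--     # Keyword-major scan: the first keyword (in priority order) that any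
--     # candidate contains decides; among its matches take the smallest
--     # order_index (first occurrence wins ties, as min does).
--     for keyword in keywords:
--         matching = [c for c in candidates if keyword in c.lower()]
--         if matching:
--             return min(matching, key=oi)
--     return min(candidates, key=oi)
-- ===== Notes on version B (the rewrite author's own statement) =====
-- stated objective: alternative
-- what changed: A scores every candidate with a (keyword-rank, order_index) tuple and takes min over candidates; B inverts the loops: it walks the 8 keywords in priority order, returns the min-order_index candidate among those containing the first keyword that matches anything, and falls back to min-order_index over all candidates.
import Mathlib
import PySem

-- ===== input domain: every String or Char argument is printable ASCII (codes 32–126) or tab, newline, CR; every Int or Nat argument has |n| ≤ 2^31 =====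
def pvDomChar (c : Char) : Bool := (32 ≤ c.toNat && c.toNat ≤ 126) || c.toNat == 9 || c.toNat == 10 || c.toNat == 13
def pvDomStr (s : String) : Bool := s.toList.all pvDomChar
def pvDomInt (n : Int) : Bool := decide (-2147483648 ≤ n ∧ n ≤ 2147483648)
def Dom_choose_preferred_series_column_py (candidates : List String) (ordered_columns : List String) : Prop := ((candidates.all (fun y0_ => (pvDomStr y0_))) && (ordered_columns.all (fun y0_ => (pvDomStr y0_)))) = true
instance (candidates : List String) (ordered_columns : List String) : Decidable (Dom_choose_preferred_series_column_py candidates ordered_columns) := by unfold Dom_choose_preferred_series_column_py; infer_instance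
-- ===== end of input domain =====

-- B replaces A's candidate-major min-by-(rank, order_index) with a keyword-major
-- scan that stops at the first keyword any candidate contains (objective: alternative).

-- ===== PORT A =====
def pvKeywordsA : List String :=
  ["ano", "year", "exercicio", "safra", "periodo", "serie", "segmento", "categoria"]

-- the 'for rank, keyword in enumerate(keywords)' loop inside score
def pvScoreLoopA (order_index : PySem.Dict String Int) (column : String) (name : String) :
    List (Int × String) → Int × Int
  | [] => (99, PySem.Dict.getD order_index column 10000)
  | (rank, keyword) :: rest =>
      if PySem.Str.isIn keyword name then
        (rank, PySem.Dict.getD order_index column 10000)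
      else pvScoreLoopA order_index column name rest

def pvScoreA (order_index : PySem.Dict String Int) (column : String) : Int × Int :=
  let name := PySem.Str.lower column
  pvScoreLoopA order_index column name (PySem.List.enumerate pvKeywordsA 0)

def choose_preferred_series_column_py (candidates : List String) (ordered_columns : List String) : Option String :=
  if candidates = [] then none
  else
    let order_index : PySem.Dict String Int :=
      (PySem.List.enumerate ordered_columns 0).foldl
        (fun d p => PySem.Dict.insert d p.2 p.1) PySem.Dict.empty
    PySem.List.min2? candidates
      (fun c => (pvScoreA order_index c).1) (fun c => (pvScoreA order_index c).2)

-- ===== PORT B =====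
def pvKeywordsB : List String :=
  ["ano", "year", "exercicio", "safra", "periodo", "serie", "segmento", "categoria"]

def pvOiB (order_index : PySem.Dict String Int) (column : String) : Int :=
  PySem.Dict.getD order_index column 10000

-- 'for keyword in keywords: …' with the final 'return min(candidates, key=oi)'
def pvPickB (order_index : PySem.Dict String Int) (candidates : List String) :
    List String → Option String
  | [] => PySem.List.min? candidates (pvOiB order_index)
  | keyword :: rest =>
      let matching := candidates.filter (fun c => PySem.Str.isIn keyword (PySem.Str.lower c))
      if matching.isEmpty then pvPickB order_index candidates rest
      else PySem.List.min? matching (pvOiB order_index)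

def choose_preferred_series_column_py_alt (candidates : List String) (ordered_columns : List String) : Option String :=
  if candidates.isEmpty then none
  else
    pvPickB
      ((PySem.List.enumerate ordered_columns 0).foldl
        (fun d p => PySem.Dict.insert d p.2 p.1) PySem.Dict.empty)
      candidates pvKeywordsB

-- ===== PRECONDITION & SPEC =====
def Spec_choose_preferred_series_column_py (candidates : List String) (ordered_columns : List String) (out : Option String) : Prop := out = choose_preferred_series_column_py_alt candidates ordered_columns
instance (candidates : List String) (ordered_columns : List String) (out : Option String) : Decidable (Spec_choose_preferred_series_column_py candidates ordered_columns out) := by unfold Spec_choose_preferred_series_column_py; infer_instance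

-- ===== CLAIM (what is proved, stated in full; the proofs are below) =====
def Claim_equal_choose_preferred_series_column_py : Prop := ∀ (candidates : List String) (ordered_columns : List String), Dom_choose_preferred_series_column_py candidates ordered_columns → Spec_choose_preferred_series_column_py candidates ordered_columns (choose_preferred_series_column_py candidates ordered_columns)

-- ===== LEMMAS AND PROOFS =====

-- A's rank of a column against the suffix of the keyword list starting at rank r
def pvRankFrom (kws : List String) (r : Int) (c : String) : Int :=
  match kws with
  | [] => 99
  | kw :: rest => if PySem.Str.isIn kw (PySem.Str.lower c) then r else pvRankFrom rest (r + 1) c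

-- the foldl step of PySem.List.min2? (specialised to String / Int keys)
def pvStep2 (k1 k2 : String → Int) (acc : Option String) (x : String) : Option String :=
  match acc with
  | none => some x
  | some m =>
      if (decide (k1 x < k1 m) || (!decide (k1 m < k1 x) && decide (k2 x < k2 m))) = true
      then some x else some m

-- the foldl step of PySem.List.min?
def pvStep1 (k2 : String → Int) (acc : Option String) (x : String) : Option String :=
  match acc with
  | none => some x
  | some m => if k2 x < k2 m then some x else some m

lemma pvMin2_eq_foldl (cs : List String) (k1 k2 : String → Int) :
    PySem.List.min2? cs k1 k2 = cs.foldl (pvStep2 k1 k2) none := by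
  simp only [PySem.List.min2?]
  congr 1
  funext acc x
  cases acc <;> rfl

lemma pvMin1_eq_foldl (cs : List String) (k2 : String → Int) :
    PySem.List.min? cs k2 = cs.foldl (pvStep1 k2) none := by
  simp only [PySem.List.min?]
  congr 1
  funext acc x
  cases acc <;> rfl

lemma pvRankFrom_ge (kws : List String) (r : Int) (c : String)
    (h : r + kws.length ≤ 99) : r ≤ pvRankFrom kws r c := by
  induction kws generalizing r with
  | nil => simpa [pvRankFrom] using by omega
  | cons kw rest ih =>
      simp only [pvRankFrom]
      split
      · omega
      · have hlen : (kw :: rest).length = rest.length + 1 := rfl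
        have := ih (r + 1) (by omega)
        omega

-- constant first key: min2? degenerates to min? on the second key (accumulated form)
lemma pvAux1 (k1 k2 : String → Int) (K : Int) :
    ∀ (cs : List String) (m : String), (∀ c ∈ cs, k1 c = K) → k1 m = K →
      cs.foldl (pvStep2 k1 k2) (some m) = cs.foldl (pvStep1 k2) (some m) := by
  intro cs
  induction cs with
  | nil => intro m _ _; rfl
  | cons c t ih =>
      intro m hall hm
      have hc : k1 c = K := hall c (by simp)
      simp only [List.foldl_cons, pvStep2, pvStep1, hc, hm]
      by_cases h2 : k2 c < k2 m
      · simp [h2]; exact ih c (fun x hx => hall x (by simp [hx])) hc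
      · simp [h2]; exact ih m (fun x hx => hall x (by simp [hx])) hm

lemma pvMin2_const (cs : List String) (k1 k2 : String → Int) (K : Int)
    (h : ∀ c ∈ cs, k1 c = K) :
    PySem.List.min2? cs k1 k2 = PySem.List.min? cs k2 := by
  cases cs with
  | nil => rfl
  | cons c t =>
      rw [pvMin2_eq_foldl, pvMin1_eq_foldl]
      simp only [List.foldl_cons]
      show t.foldl (pvStep2 k1 k2) (some c) = t.foldl (pvStep1 k2) (some c)
      exact pvAux1 k1 k2 K t c (fun x hx => h x (by simp [hx])) (h c (by simp))

-- congruence: min2? only looks at key values of list members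
lemma pvAux3 (k1 k2 k1' k2' : String → Int) :
    ∀ (cs : List String) (acc : Option String),
      (∀ c ∈ cs, k1 c = k1' c ∧ k2 c = k2' c) →
      (∀ m, acc = some m → k1 m = k1' m ∧ k2 m = k2' m) →
      cs.foldl (pvStep2 k1 k2) acc = cs.foldl (pvStep2 k1' k2') acc := by
  intro cs
  induction cs with
  | nil => intro acc _ _; rfl
  | cons c t ih =>
      intro acc hall hacc
      have hc := hall c (by simp)
      have hstep : pvStep2 k1 k2 acc c = pvStep2 k1' k2' acc c := by
        cases acc with
        | none => rfl
        | some m =>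
            have hm := hacc m rfl
            simp [pvStep2, hc.1, hc.2, hm.1, hm.2]
      simp only [List.foldl_cons, hstep]
      refine ih _ (fun x hx => hall x (by simp [hx])) ?_
      intro m hm
      cases acc with
      | none => simp [pvStep2] at hm; exact hm ▸ hc
      | some a =>
          simp only [pvStep2] at hm
          split at hm
          · exact (Option.some.injEq _ _ ▸ hm) ▸ hc
          · exact (Option.some.injEq _ _ ▸ hm) ▸ hacc a rfl

lemma pvMin2_congr (cs : List String) (k1 k2 k1' k2' : String → Int)
    (h : ∀ c ∈ cs, k1 c = k1' c ∧ k2 c = k2' c) :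
    PySem.List.min2? cs k1 k2 = PySem.List.min2? cs k1' k2' := by
  rw [pvMin2_eq_foldl, pvMin2_eq_foldl]
  exact pvAux3 k1 k2 k1' k2' cs none h (by intro m hm; cases hm)

-- once a matched accumulator holds, min2? tracks min? over the matched sublist
lemma pvAux2 (P : String → Bool) (k1 k2 : String → Int) (Lo : Int) :
    ∀ (cs : List String),
      (∀ c ∈ cs, if P c then k1 c = Lo else Lo < k1 c) →
      ∀ (m : String), P m = true → k1 m = Lo →
      cs.foldl (pvStep2 k1 k2) (some m) = (cs.filter P).foldl (pvStep1 k2) (some m) := by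
  intro cs
  induction cs with
  | nil => intro _ m _ _; rfl
  | cons c t ih =>
      intro hall m hPm hm
      have hc := hall c (by simp)
      by_cases hP : P c
      · have hc1 : k1 c = Lo := by simpa [hP] using hc
        have hstep : pvStep2 k1 k2 (some m) c =
            if k2 c < k2 m then some c else some m := by
          simp [pvStep2, hc1, hm]
        rw [List.foldl_cons, hstep, List.filter_cons_of_pos hP, List.foldl_cons]
        show _ = ((t.filter P).foldl (pvStep1 k2) (pvStep1 k2 (some m) c))
        by_cases h2 : k2 c < k2 m
        · simp only [h2, reduceIte, pvStep1]
          exact ih (fun x hx => hall x (by simp [hx])) c hP hc1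
        · simp only [h2, reduceIte, pvStep1]
          exact ih (fun x hx => hall x (by simp [hx])) m hPm hm
      · have hc1 : Lo < k1 c := by simpa [hP] using hc
        have hstep : pvStep2 k1 k2 (some m) c = some m := by
          have h1 : ¬ k1 c < k1 m := by omega
          have h2 : k1 m < k1 c := by omega
          simp [pvStep2, h1, h2]
        rw [List.foldl_cons, hstep, List.filter_cons_of_neg (by simpa using hP)]
        exact ih (fun x hx => hall x (by simp [hx])) m hPm hm

-- before any matched element is seen, the accumulator is an unmatched element
lemma pvAux2pre (P : String → Bool) (k1 k2 : String → Int) (Lo : Int) :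
    ∀ (cs : List String),
      (∀ c ∈ cs, if P c then k1 c = Lo else Lo < k1 c) →
      ∀ (m : String), P m = false → Lo < k1 m →
      cs.filter P ≠ [] →
      cs.foldl (pvStep2 k1 k2) (some m) = (cs.filter P).foldl (pvStep1 k2) none := by
  intro cs
  induction cs with
  | nil => intro _ m _ _ hne; simp at hne
  | cons c t ih =>
      intro hall m hPm hm hne
      have hc := hall c (by simp)
      by_cases hP : P c
      · have hc1 : k1 c = Lo := by simpa [hP] using hc
        have hstep : pvStep2 k1 k2 (some m) c = some c := by
          have h1 : k1 c < k1 m := by omega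
          simp [pvStep2, h1]
        rw [List.foldl_cons, hstep, List.filter_cons_of_pos hP, List.foldl_cons]
        show _ = ((t.filter P).foldl (pvStep1 k2) (some c))
        exact pvAux2 P k1 k2 Lo t (fun x hx => hall x (by simp [hx])) c hP hc1
      · have hc1 : Lo < k1 c := by simpa [hP] using hc
        have hfe : (c :: t).filter P = t.filter P := List.filter_cons_of_neg (by simpa using hP)
        have hne' : t.filter P ≠ [] := by rw [hfe] at hne; exact hne
        rw [List.foldl_cons, hfe]
        have hstep : pvStep2 k1 k2 (some m) c = some c ∨ pvStep2 k1 k2 (some m) c = some m := by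
          simp only [pvStep2]; split <;> simp
        rcases hstep with h | h
        · rw [h]; exact ih (fun x hx => hall x (by simp [hx])) c (by simpa using hP) hc1 hne'
        · rw [h]; exact ih (fun x hx => hall x (by simp [hx])) m hPm hm hne'

lemma pvMin2_filter (cs : List String) (P : String → Bool) (k1 k2 : String → Int) (Lo : Int)
    (hall : ∀ c ∈ cs, if P c then k1 c = Lo else Lo < k1 c)
    (hne : cs.filter P ≠ []) :
    PySem.List.min2? cs k1 k2 = PySem.List.min? (cs.filter P) k2 := by
  cases cs with
  | nil => simp at hne
  | cons c t =>
      rw [pvMin2_eq_foldl, pvMin1_eq_foldl]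
      simp only [List.foldl_cons]
      have hc := hall c (by simp)
      by_cases hP : P c
      · have hc1 : k1 c = Lo := by simpa [hP] using hc
        rw [List.filter_cons_of_pos hP, List.foldl_cons]
        show t.foldl (pvStep2 k1 k2) (some c) = ((t.filter P).foldl (pvStep1 k2) (some c))
        exact pvAux2 P k1 k2 Lo t (fun x hx => hall x (by simp [hx])) c hP hc1
      · have hc1 : Lo < k1 c := by simpa [hP] using hc
        have hfe : (c :: t).filter P = t.filter P := List.filter_cons_of_neg (by simpa using hP)
        rw [hfe]
        have hne' : t.filter P ≠ [] := by rw [hfe] at hne; exact hne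
        exact pvAux2pre P k1 k2 Lo t (fun x hx => hall x (by simp [hx])) c
          (by simpa using hP) hc1 hne'

-- A's score loop over enumerate(kws, r) computes (pvRankFrom kws r, order_index.get(column, 10000))
lemma pvHasKw_eq (kw c : String) :
    PySem.Str.isIn kw (PySem.Str.lower c) = PySem.Chars.isIn kw.toList (PySem.Chars.lower c.toList) := by
  simp [PySem.Str.isIn]

lemma pvScoreLoop_eq (D : PySem.Dict String Int) (column : String) :
    ∀ (kws : List String) (r : Int),
      pvScoreLoopA D column (PySem.Str.lower column) (PySem.List.enumerate kws r)
        = (pvRankFrom kws r column, pvOiB D column) := by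
  intro kws
  induction kws with
  | nil => intro r; rfl
  | cons kw rest ih =>
      intro r
      by_cases h : PySem.Chars.isIn kw.toList (PySem.Chars.lower column.toList) = true
      · simp [pvScoreLoopA, pvRankFrom, PySem.List.enumerate_cons, h, pvOiB]
      · simp [pvScoreLoopA, pvRankFrom, PySem.List.enumerate_cons, h, ih (r + 1)]

-- the heart: min-by-(rank, oi) over candidates = keyword-major scan
lemma pvPick_eq (D : PySem.Dict String Int) :
    ∀ (kws : List String) (r : Int), r + (kws.length : Int) ≤ 99 →
      ∀ (cs : List String),
        PySem.List.min2? cs (fun c => pvRankFrom kws r c) (fun c => pvOiB D c)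
          = pvPickB D cs kws := by
  intro kws
  induction kws with
  | nil =>
      intro r _ cs
      simp only [pvPickB]
      exact pvMin2_const cs _ _ 99 (fun c _ => rfl)
  | cons kw rest ih =>
      intro r hr cs
      have hr' : r + 1 + (rest.length : Int) ≤ 99 := by
        have hlen : (kw :: rest).length = rest.length + 1 := rfl
        omega
      simp only [pvPickB]
      by_cases hemp : (cs.filter (fun c => PySem.Str.isIn kw (PySem.Str.lower c))).isEmpty
      · rw [if_pos hemp]
        have hnone : ∀ c ∈ cs, PySem.Chars.isIn kw.toList (PySem.Chars.lower c.toList) = false := by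
          intro c hc
          by_contra h
          have hmem : c ∈ cs.filter (fun c => PySem.Str.isIn kw (PySem.Str.lower c)) := by
            rw [List.mem_filter]
            exact ⟨hc, by rw [pvHasKw_eq]; simpa using h⟩
          rw [List.isEmpty_iff] at hemp
          rw [hemp] at hmem
          simp at hmem
        have hcongr := pvMin2_congr cs
          (fun c => pvRankFrom (kw :: rest) r c) (fun c => pvOiB D c)
          (fun c => pvRankFrom rest (r + 1) c) (fun c => pvOiB D c)
          (by
            intro c hc
            refine ⟨?_, rfl⟩
            simp only [pvRankFrom, pvHasKw_eq, hnone c hc]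
            simp)
        rw [hcongr]
        exact ih (r + 1) hr' cs
      · rw [if_neg hemp]
        have hne : cs.filter (fun c => PySem.Str.isIn kw (PySem.Str.lower c)) ≠ [] := by
          intro h; rw [h] at hemp; simp at hemp
        exact pvMin2_filter cs (fun c => PySem.Str.isIn kw (PySem.Str.lower c)) _ _ r
          (by
            intro c _
            by_cases h : PySem.Chars.isIn kw.toList (PySem.Chars.lower c.toList) = true
            · have hb : PySem.Str.isIn kw (PySem.Str.lower c) = true := by rw [pvHasKw_eq]; exact h
              rw [if_pos hb]
              simp only [pvRankFrom, pvHasKw_eq, h]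
              simp
            · have hb : ¬ PySem.Str.isIn kw (PySem.Str.lower c) = true := by rw [pvHasKw_eq]; exact h
              rw [if_neg hb]
              have hge := pvRankFrom_ge rest (r + 1) c hr'
              simp only [pvRankFrom, pvHasKw_eq, h]
              simp only [Bool.false_eq_true, if_false]
              omega)
          hne

-- ===== VERDICT (by name: the statement is the Claim_ definition above) =====
theorem choose_preferred_series_column_py_spec : Claim_equal_choose_preferred_series_column_py := by
  intro candidates ordered_columns _
  unfold Spec_choose_preferred_series_column_py
  unfold choose_preferred_series_column_py choose_preferred_series_column_py_alt
  by_cases hemp : candidates = []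
  · simp [hemp]
  · rw [if_neg hemp, if_neg (by simpa using hemp)]
    set D := (PySem.List.enumerate ordered_columns 0).foldl
      (fun d p => PySem.Dict.insert d p.2 p.1) PySem.Dict.empty with hD
    have hscore : ∀ c, pvScoreA D c = (pvRankFrom pvKeywordsA 0 c, pvOiB D c) := by
      intro c
      unfold pvScoreA
      exact pvScoreLoop_eq D c pvKeywordsA 0
    calc PySem.List.min2? candidates (fun c => (pvScoreA D c).1) (fun c => (pvScoreA D c).2)
        = PySem.List.min2? candidates (fun c => pvRankFrom pvKeywordsA 0 c) (fun c => pvOiB D c) := by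
          exact pvMin2_congr _ _ _ _ _ (fun c _ => by rw [hscore c]; exact ⟨rfl, rfl⟩)
      _ = pvPickB D candidates pvKeywordsA := pvPick_eq D pvKeywordsA 0 (by norm_num [pvKeywordsA]) candidates
      _ = pvPickB D candidates pvKeywordsB := rfl
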